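-- pv_equiv track=rewrite | github.com/kovacsbenceckik/webfejelsztes2023-24 | Python/Fuggvenyek/egyedi_hosszuak.py | egyedi_hosszuak
-- ===== SOURCE A (Python) =====
-- def bennevan(elem, lista):
--     i = 0
--     while i < len(lista) and not(lista[i] == elem):
--         i += 1
--     return i < len(lista)
--
-- def egyedi_hosszuak(szavak):
--     egyediek = []
--     hosszak = []
--     for i in range(len(szavak)):
--         if not(bennevan(len(szavak[i]), hosszak)):
--             egyediek.append(szavak[i])
--             hosszak.append(len(szavak[i]))
--     return egyediek
-- ===== SOURCE B (Python) =====
-- def egyedi_hosszuak(szavak):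
--     csoportok = {}
--     for szo in szavak:
--         csoportok.setdefault(len(szo), []).append(szo)
--     return [csoport[0] for csoport in csoportok.values()]
-- ===== Notes on version B (the rewrite author's own statement) =====
-- stated objective: faster
-- what changed: A filters with a quadratic hand-written linear membership scan over the seen lengths; B instead groups all words by length into a dict in one unconditional pass and then takes the first word of each group in key-insertion order.
import Mathlib
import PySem

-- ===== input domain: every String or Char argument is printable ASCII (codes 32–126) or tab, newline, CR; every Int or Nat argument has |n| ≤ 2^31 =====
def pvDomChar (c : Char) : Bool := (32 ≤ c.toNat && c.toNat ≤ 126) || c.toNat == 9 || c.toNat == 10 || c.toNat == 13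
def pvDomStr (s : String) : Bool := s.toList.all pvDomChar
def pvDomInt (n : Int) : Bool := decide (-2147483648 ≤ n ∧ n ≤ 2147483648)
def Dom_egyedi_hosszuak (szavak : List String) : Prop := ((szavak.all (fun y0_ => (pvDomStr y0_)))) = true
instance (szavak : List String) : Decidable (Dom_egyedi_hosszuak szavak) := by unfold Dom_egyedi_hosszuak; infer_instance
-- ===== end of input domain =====

-- B groups words by length in a dict in one pass and returns each group's first word; A's quadratic membership scan is gone.


-- ===== PORT A =====
-- the while loop of bennevan: advance i until i == len(lista) or lista[i] == elem; returns the final i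
def bennevanLoop (elem : Int) (lista : List Int) (i : Nat) : Nat :=
  if h : i < lista.length then
    if lista[i] = elem then i else bennevanLoop elem lista (i + 1)
  else i
termination_by lista.length - i

def bennevan (elem : Int) (lista : List Int) : Bool :=
  decide (bennevanLoop elem lista 0 < lista.length)

def egyedi_hosszuak (szavak : List String) : List String :=
  ((PySem.List.pyRange 0 (PySem.List.len szavak) 1).foldl
    (fun (st : List String × List Int) i =>
      let szo := PySem.List.pyGetD szavak i ""   -- szavak[i]; i is always in range
      if !(bennevan (PySem.Str.len szo) st.2) then (st.1 ++ [szo], st.2 ++ [PySem.Str.len szo]) else st)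
    ([], [])).1

-- ===== PORT B =====
def egyedi_hosszuak_alt (szavak : List String) : List String :=
  let csoportok := szavak.foldl
    (fun d szo => d.modify (PySem.Str.len szo) [] (fun g => g ++ [szo]))  -- setdefault(len(szo), []).append(szo)
    PySem.Dict.empty
  -- csoport[0]: every group is nonempty, so pyGet? is always some and the "" default is unreachable
  csoportok.values.map (fun csoport => (PySem.List.pyGet? csoport 0).getD "")

-- ===== PRECONDITION & SPEC =====
def Spec_egyedi_hosszuak (szavak : List String) (out : List String) : Prop := out = egyedi_hosszuak_alt szavak
instance (szavak : List String) (out : List String) : Decidable (Spec_egyedi_hosszuak szavak out) := by unfold Spec_egyedi_hosszuak; infer_instance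

-- ===== CLAIM (what is proved, stated in full; the proofs are below) =====
def Claim_equal_egyedi_hosszuak : Prop := ∀ (szavak : List String), Dom_egyedi_hosszuak szavak → Spec_egyedi_hosszuak szavak (egyedi_hosszuak szavak)

-- ===== LEMMAS AND PROOFS =====

theorem bennevanLoop_lt_iff (elem : Int) (lista : List Int) (i : Nat) :
    bennevanLoop elem lista i < lista.length ↔ elem ∈ lista.drop i := by
  induction i using bennevanLoop.induct elem lista with
  | case1 i h heq =>
    rw [bennevanLoop, dif_pos h, if_pos heq]
    simp only [h, true_iff]
    rw [List.drop_eq_getElem_cons h]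
    exact heq ▸ List.mem_cons_self
  | case2 i h hne ih =>
    rw [bennevanLoop, dif_pos h, if_neg hne]
    rw [ih, List.drop_eq_getElem_cons h, List.mem_cons]
    constructor
    · exact Or.inr
    · rintro (rfl | hm)
      · exact absurd rfl hne
      · exact hm
  | case3 i h =>
    rw [bennevanLoop, dif_neg h]
    simp only [h, false_iff]
    rw [List.drop_eq_nil_of_le (by omega)]
    simp

theorem bennevan_eq (elem : Int) (lista : List Int) :
    bennevan elem lista = decide (elem ∈ lista) := by
  simp only [bennevan, bennevanLoop_lt_iff, List.drop_zero]

-- first word of each group, in dict order (= what B returns)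
def pvFirsts (d : PySem.Dict Int (List String)) : List String :=
  d.items.map (fun p => (PySem.List.pyGet? p.2 0).getD "")

-- A's loop body and B's loop body as named steps (definitionally those of the ports)
def pvStepA (st : List String × List Int) (szo : String) : List String × List Int :=
  if !(bennevan (PySem.Str.len szo) st.2) then (st.1 ++ [szo], st.2 ++ [PySem.Str.len szo]) else st

def pvStepB (d : PySem.Dict Int (List String)) (szo : String) : PySem.Dict Int (List String) :=
  d.modify (PySem.Str.len szo) [] (fun g => g ++ [szo])

theorem pyGet?_zero_append (g : List String) (x : String) (hg : g ≠ []) :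
    (PySem.List.pyGet? (g ++ [x]) 0).getD "" = (PySem.List.pyGet? g 0).getD "" := by
  cases g with
  | nil => exact absurd rfl hg
  | cons a t => simp [PySem.List.pyGet?_zero_cons]

theorem pv_loop_inv (szavak : List String) :
    ∀ (d : PySem.Dict Int (List String)),
      d.keys.Nodup → (∀ p ∈ d.items, p.2 ≠ []) →
      szavak.foldl pvStepA (pvFirsts d, d.keys) =
        (pvFirsts (szavak.foldl pvStepB d), (szavak.foldl pvStepB d).keys) := by
  induction szavak with
  | nil => intro d _ _; simp
  | cons szo rest ih =>
    intro d hnodup hne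
    have hmod : pvStepB d szo =
        d.insert (PySem.Str.len szo) (d.getD (PySem.Str.len szo) [] ++ [szo]) := rfl
    by_cases hc : d.contains (PySem.Str.len szo) = true
    · -- length already present: A keeps its state, B extends the existing group
      have hmem : (szo.length : Int) ∈ d.keys := by
        simpa using (PySem.Dict.contains_iff_mem_keys d _).mp hc
      have hA : pvStepA (pvFirsts d, d.keys) szo = (pvFirsts d, d.keys) := by
        simp [pvStepA, bennevan_eq, hmem]
      have hkeys : (pvStepB d szo).keys = d.keys := by
        rw [hmod]; exact PySem.Dict.keys_insert_of_contains d _ hc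
      have hitems : (pvStepB d szo).items =
          d.items.map (fun p => if p.1 == PySem.Str.len szo
            then (PySem.Str.len szo, d.getD (PySem.Str.len szo) [] ++ [szo]) else p) := by
        rw [hmod]; exact PySem.Dict.items_insert_of_contains d _ hc
      have hfirsts : pvFirsts (pvStepB d szo) = pvFirsts d := by
        unfold pvFirsts
        rw [hitems, List.map_map]
        apply List.map_congr_left
        intro p hp
        by_cases hpk : p.1 = PySem.Str.len szo
        · have hgd : d.getD (PySem.Str.len szo) [] = p.2 := by
            have : (PySem.Str.len szo, p.2) ∈ d.items := by
              rw [← hpk]; exact hp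
            exact PySem.Dict.getD_of_mem_items d this hnodup []
          simp only [Function.comp_apply, hpk, beq_self_eq_true, if_true, hgd]
          exact pyGet?_zero_append p.2 szo (hne p hp)
        · have hpk' : p.1 ≠ (szo.length : Int) := by simpa using hpk
          simp [Function.comp_apply, hpk']
      have hne' : ∀ p ∈ (pvStepB d szo).items, p.2 ≠ [] := by
        intro p hp
        rw [hitems] at hp
        obtain ⟨q, hq, hqe⟩ := List.mem_map.mp hp
        by_cases hqk : q.1 == PySem.Str.len szo
        · rw [if_pos hqk] at hqe; rw [← hqe]; simp
        · rw [if_neg hqk] at hqe; rw [← hqe]; exact hne q hq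
      rw [List.foldl_cons, hA]
      have := ih (pvStepB d szo) (hkeys ▸ hnodup) hne'
      rw [hkeys, hfirsts] at this
      rw [this]
      simp [List.foldl_cons]
    · -- new length: A appends the word and the length, B starts a new group at the end
      have hc' : d.contains (PySem.Str.len szo) = false := by
        simpa using hc
      have hmem : (szo.length : Int) ∉ d.keys := fun hm =>
        hc ((PySem.Dict.contains_iff_mem_keys d _).mpr (by simpa using hm))
      have hA : pvStepA (pvFirsts d, d.keys) szo =
          (pvFirsts d ++ [szo], d.keys ++ [PySem.Str.len szo]) := by
        simp [pvStepA, bennevan_eq, hmem]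
      have hgd : d.getD (PySem.Str.len szo) [] = [] :=
        PySem.Dict.getD_of_not_contains d _ hc'
      have hkeys : (pvStepB d szo).keys = d.keys ++ [PySem.Str.len szo] := by
        rw [hmod]; exact PySem.Dict.keys_insert_of_not_contains d _ hc'
      have hitems : (pvStepB d szo).items = d.items ++ [(PySem.Str.len szo, [szo])] := by
        rw [hmod, PySem.Dict.items_insert_of_not_contains d _ hc', hgd]
        simp
      have hfirsts : pvFirsts (pvStepB d szo) = pvFirsts d ++ [szo] := by
        unfold pvFirsts
        rw [hitems, List.map_append]
        simp
      have hnodup' : (pvStepB d szo).keys.Nodup := by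
        rw [hkeys]
        exact List.Nodup.append hnodup (List.nodup_singleton _)
          (by simpa using hmem)
      have hne' : ∀ p ∈ (pvStepB d szo).items, p.2 ≠ [] := by
        intro p hp
        rw [hitems] at hp
        rcases List.mem_append.mp hp with h | h
        · exact hne p h
        · simp at h; rw [h]; simp
      rw [List.foldl_cons, hA]
      have := ih (pvStepB d szo) hnodup' hne'
      rw [hkeys, hfirsts] at this
      rw [this]
      simp [List.foldl_cons]

-- ===== VERDICT (by name: the statement is the Claim_ definition above) =====
theorem egyedi_hosszuak_spec : Claim_equal_egyedi_hosszuak := by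
  intro szavak _
  unfold Spec_egyedi_hosszuak egyedi_hosszuak egyedi_hosszuak_alt
  rw [PySem.List.foldl_pyRange_zero_pyGetD szavak ""
    (fun (st : List String × List Int) szo =>
      if !(bennevan (PySem.Str.len szo) st.2) then (st.1 ++ [szo], st.2 ++ [PySem.Str.len szo]) else st)
    ([], [])]
  have h0 : (([], []) : List String × List Int) = (pvFirsts PySem.Dict.empty, (PySem.Dict.empty : PySem.Dict Int (List String)).keys) := by
    simp [pvFirsts, PySem.Dict.empty]
  have := pv_loop_inv szavak PySem.Dict.empty (by simp [PySem.Dict.empty]) (by simp [PySem.Dict.empty])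
  rw [h0]
  show (szavak.foldl pvStepA _).1 = _
  rw [this]
  simp [pvFirsts, PySem.Dict.values, List.map_map]
  rfl
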